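-- pv_equiv track=rewrite | github.com/franditt/ttslab | ttslab/voices/yoruba_orth2tones.py | prevbasechar
-- ===== SOURCE A (Python) =====
-- BASECHARS = "abcdefghijklmnopqrstuvwxyz"
--
-- def prevbasechar(word, i):
--     try:
--         bc = word[i-1]
--     except IndexError:
--         return " ", i-1
--     if bc not in BASECHARS:
--         return prevbasechar(word, i-1)
--     else:
--         return bc, i-1
-- ===== SOURCE B (Python) =====
-- BASECHARS = "abcdefghijklmnopqrstuvwxyz"
--
-- def prevbasechar(word, i):
--     while True:
--         try:
--             bc = word[i - 1]
--         except IndexError: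
--             return " ", i - 1
--         if bc in BASECHARS:
--             return bc, i - 1
--         i -= 1
-- ===== Notes on version B (the rewrite author's own statement) =====
-- stated objective: simpler
-- what changed: Rewrites A's tail recursion as a flat iterative while-loop that decrements the index in place, with the found-basechar case returned first; same linear scan, no recursion.
import Mathlib
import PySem

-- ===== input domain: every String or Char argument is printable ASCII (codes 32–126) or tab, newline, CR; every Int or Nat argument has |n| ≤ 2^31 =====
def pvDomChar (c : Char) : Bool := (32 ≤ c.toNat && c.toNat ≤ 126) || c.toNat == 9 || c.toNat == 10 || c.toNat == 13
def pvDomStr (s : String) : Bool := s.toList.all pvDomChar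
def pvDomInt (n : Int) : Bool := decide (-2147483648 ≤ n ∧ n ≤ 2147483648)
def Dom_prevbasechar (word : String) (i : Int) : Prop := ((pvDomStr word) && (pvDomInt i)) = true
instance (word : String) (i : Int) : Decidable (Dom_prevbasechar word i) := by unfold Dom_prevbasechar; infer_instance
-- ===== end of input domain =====

-- B rewrites A's tail recursion as a flat iterative while-loop (found case first,
-- index decremented in place); objective: simpler. Equivalence proved on all inputs.

-- ===== PORT A =====
def pvBasechars : List Char := "abcdefghijklmnopqrstuvwxyz".toList

def prevbasechar (word : String) (i : Int) : String × Int :=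
  match h : PySem.Str.pyGet? word (i - 1) with
  | none => (" ", i - 1)
  | some bc =>
      if bc ∉ pvBasechars then prevbasechar word (i - 1)
      else (String.ofList [bc], i - 1)
termination_by (i + word.toList.length).toNat
decreasing_by
  have h' := h
  rw [PySem.Str.pyGet?_eq, PySem.Chars.pyGet?_eq_listPyGet?] at h'
  have hr : ¬ (PySem.List.pyGet? word.toList (i - 1) = none) := by simp [h']
  rw [PySem.List.pyGet?_eq_none_iff, not_not] at hr
  have := hr.1
  omega

-- ===== PORT B =====
-- B's `while True` loop: the loop state is the mutated variable i.
def prevbasecharAltLoop (word : String) (i : Int) : String × Int :=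
  if h : (PySem.Str.pyGet? word (i - 1)).isSome then
    let bc := (PySem.Str.pyGet? word (i - 1)).get h
    if bc ∈ pvBasechars then (String.ofList [bc], i - 1)
    else prevbasecharAltLoop word (i - 1)
  else (" ", i - 1)
termination_by (i + word.toList.length).toNat
decreasing_by
  have h' : PySem.Str.pyGet? word (i - 1) ≠ none := by
    intro hn; rw [hn] at h; simp at h
  rw [PySem.Str.pyGet?_eq, PySem.Chars.pyGet?_eq_listPyGet?] at h'
  rw [Ne, PySem.List.pyGet?_eq_none_iff, not_not] at h'
  have := h'.1
  omega

def prevbasechar_alt (word : String) (i : Int) : String × Int :=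
  prevbasecharAltLoop word i

-- ===== PRECONDITION & SPEC =====
def Spec_prevbasechar (word : String) (i : Int) (out : String × Int) : Prop := out = prevbasechar_alt word i
instance (word : String) (i : Int) (out : String × Int) : Decidable (Spec_prevbasechar word i out) := by unfold Spec_prevbasechar; infer_instance

-- ===== CLAIM (what is proved, stated in full; the proofs are below) =====
def Claim_equal_prevbasechar : Prop := ∀ (word : String) (i : Int), Dom_prevbasechar word i → Spec_prevbasechar word i (prevbasechar word i)

-- ===== LEMMAS AND PROOFS =====
theorem pv_ab (word : String) (i : Int) : prevbasechar word i = prevbasecharAltLoop word i := by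
  fun_induction prevbasechar word i with
  | case1 i h =>
      rw [prevbasecharAltLoop]
      simp only [h, Option.isSome_none, Bool.false_eq_true, dif_neg, not_false_iff]
  | case2 i bc h hc ih =>
      rw [prevbasecharAltLoop]
      simp only [h, Option.isSome_some, Option.get_some, dite_true]
      rw [if_neg hc]
      exact ih
  | case3 i bc h hc =>
      rw [prevbasecharAltLoop]
      simp only [h, Option.isSome_some, Option.get_some, dite_true]
      rw [if_pos (by simpa using hc)]

-- ===== VERDICT (by name: the statement is the Claim_ definition above) =====
theorem prevbasechar_spec : Claim_equal_prevbasechar := by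
  intro word i _
  exact pv_ab word i
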